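-- pv_equiv track=rewrite | github.com/Emilygonzalez20/txt | pruebas.py | contar_letras_y_espacios
-- ===== SOURCE A (Python) =====
-- def contar_letras_y_espacios(contenido):
--     letras = 0
--     espacios = 0
--     for c in contenido:
--         if c.isalpha():
--             letras += 1
--         elif c.isspace():
--             espacios += 1
--     return letras, espacios
-- ===== SOURCE B (Python) =====
-- def contar_letras_y_espacios(contenido):
--     letras = sum(1 for c in contenido if c.isalpha())
--     espacios = sum(1 for c in contenido if c.isspace())
--     return letras, espacios
-- ===== Notes on version B (the rewrite author's own statement) =====
-- stated objective: simpler
-- what changed: Replaces the single interleaved if/elif accumulator loop with two independent full-pass count comprehensions (correct because isalpha and isspace are mutually exclusive).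
import Mathlib
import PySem

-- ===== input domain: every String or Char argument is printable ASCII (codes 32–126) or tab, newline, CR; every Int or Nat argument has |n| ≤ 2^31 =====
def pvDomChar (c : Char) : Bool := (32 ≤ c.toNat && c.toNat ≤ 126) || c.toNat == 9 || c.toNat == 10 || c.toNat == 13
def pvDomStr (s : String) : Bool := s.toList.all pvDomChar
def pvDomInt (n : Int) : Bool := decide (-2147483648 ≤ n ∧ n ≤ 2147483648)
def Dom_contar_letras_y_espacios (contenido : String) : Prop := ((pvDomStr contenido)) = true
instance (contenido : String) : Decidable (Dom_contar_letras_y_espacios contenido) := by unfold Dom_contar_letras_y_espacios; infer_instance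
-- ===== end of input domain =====

-- B replaces A's single interleaved if/elif loop by two independent full-pass counts (simpler decomposition; isalpha and isspace are disjoint).


-- ===== PORT A =====
-- one pass: a fold carrying (letras, espacios), if/elif in source order
def contar_letras_y_espacios (contenido : String) : Int × Int :=
  contenido.toList.foldl
    (fun (st : Int × Int) c =>
      if PySem.Chars.isalpha c then (st.1 + 1, st.2)
      else if PySem.Chars.isspace c then (st.1, st.2 + 1)
      else st)
    (0, 0)

-- ===== PORT B =====
-- two independent passes: sum(1 for c in contenido if c.isalpha()) and likewise for isspace
def contar_letras_y_espacios_alt (contenido : String) : Int × Int :=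
  ((contenido.toList.filter (fun c => PySem.Chars.isalpha c)).length,
   (contenido.toList.filter (fun c => PySem.Chars.isspace c)).length)

-- ===== PRECONDITION & SPEC =====
def Spec_contar_letras_y_espacios (contenido : String) (out : Int × Int) : Prop := out = contar_letras_y_espacios_alt contenido
instance (contenido : String) (out : Int × Int) : Decidable (Spec_contar_letras_y_espacios contenido out) := by unfold Spec_contar_letras_y_espacios; infer_instance

-- ===== CLAIM (what is proved, stated in full; the proofs are below) =====
def Claim_equal_contar_letras_y_espacios : Prop := ∀ (contenido : String), Dom_contar_letras_y_espacios contenido → Spec_contar_letras_y_espacios contenido (contar_letras_y_espacios contenido)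

-- ===== LEMMAS AND PROOFS =====

theorem alpha_not_space (c : Char) (h : PySem.Chars.isalpha c = true) :
    PySem.Chars.isspace c = false := by
  simp only [PySem.Chars.isalpha, PySem.Chars.isupper, PySem.Chars.islower, Bool.or_eq_true,
    Bool.and_eq_true, decide_eq_true_eq, Char.le_def, UInt32.le_iff_toNat_le] at h
  simp only [PySem.Chars.isspace, Bool.or_eq_false_iff, Bool.and_eq_false_iff, decide_eq_false_iff_not]
  have hc : c.toNat = c.val.toNat := rfl
  have hA : ('A' : Char).val.toNat = 65 := rfl
  have hZ : ('Z' : Char).val.toNat = 90 := rfl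
  have ha : ('a' : Char).val.toNat = 97 := rfl
  have hz : ('z' : Char).val.toNat = 122 := rfl
  omega

theorem fold_invariant (cs : List Char) (l e : Int) :
    cs.foldl
      (fun (st : Int × Int) c =>
        if PySem.Chars.isalpha c then (st.1 + 1, st.2)
        else if PySem.Chars.isspace c then (st.1, st.2 + 1)
        else st)
      (l, e)
    = (l + (cs.filter (fun c => PySem.Chars.isalpha c)).length,
       e + (cs.filter (fun c => PySem.Chars.isspace c)).length) := by
  induction cs generalizing l e with
  | nil => simp
  | cons c cs ih =>
    by_cases ha : PySem.Chars.isalpha c = true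
    · have hs := alpha_not_space c ha
      simp [ha, hs, ih]
      ring
    · by_cases hs : PySem.Chars.isspace c = true
      · simp [ha, hs, ih]
        ring
      · simp [ha, hs, ih]

-- ===== VERDICT (by name: the statement is the Claim_ definition above) =====
theorem contar_letras_y_espacios_spec : Claim_equal_contar_letras_y_espacios := by
  intro contenido _
  unfold Spec_contar_letras_y_espacios contar_letras_y_espacios contar_letras_y_espacios_alt
  rw [fold_invariant]
  simp
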